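-- pv_equiv track=rewrite | github.com/Danwuoo/Data-Fetcher | src/backtest_data_module/data_processing/cross_validation.py | combinatorial_purged_cv
-- ===== SOURCE A (Python) =====
-- from itertools import combinations
-- from typing import Callable, Dict, Iterator, List
--
-- def combinatorial_purged_cv(
--     n_splits: int,
--     n_samples: int,
--     n_test_splits: int,
--     embargo: int,
-- ) -> Iterator[tuple[list[int], list[int]]]:
--     """
--     Generate indices for Combinatorial Purged Cross-Validation.
--
--     This method creates all possible combinations of train/test splits from
--     N folds, where k folds are used for testing. It also applies purging
--     and embargoing to prevent data leakage.
--
--     Args: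
--         n_splits: The total number of folds to split the data into.
--         n_samples: The total number of samples in the data.
--         n_test_splits: The number of folds to use for testing in each combination.
--         embargo: The number of samples to remove from the training set
--                  around the test set.
--
--     Yields:
--         A tuple of (train_indices, test_indices) for each combination.
--     """
--     if n_test_splits <= 0 or n_test_splits >= n_splits:
--         raise ValueError(
--             "n_test_splits must be between 1 and n_splits-1"
--         )
--
--     fold_size = n_samples // n_splits
--     indices = list(range(n_samples))
--     folds = [
--         indices[i * fold_size : (i + 1) * fold_size] for i in range(n_splits)
--     ]
--     if n_samples % n_splits:
--         folds[-1].extend(indices[n_splits * fold_size :])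
--
--     for combo in combinations(range(n_splits), n_test_splits):
--         test_indices = sorted([i for idx in combo for i in folds[idx]])
--         embargo_indices: set[int] = set()
--         for idx in combo:
--             start = folds[idx][0]
--             end = folds[idx][-1]
--             embargo_indices.update(range(max(0, start - embargo), start))
--             embargo_indices.update(
--                 range(end + 1, min(n_samples, end + embargo + 1))
--             )
--
--         train_indices = [
--             i
--             for j, fold in enumerate(folds)
--             if j not in combo
--             for i in fold
--             if i not in embargo_indices
--         ]
--         yield train_indices, test_indices
-- ===== SOURCE B (Python) =====
-- from itertools import combinations
--
--
-- def combinatorial_purged_cv(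
--     n_splits: int,
--     n_samples: int,
--     n_test_splits: int,
--     embargo: int,
-- ):
--     """Combinatorial Purged CV by interval sweep: each test fold blocks the single
--     contiguous interval [max(0, start - embargo), min(n_samples, end + embargo));
--     the train set is the ascending complement of the union of these intervals,
--     produced by one cursor sweep over the (sorted) combo — no index sets, no
--     per-index membership tests, no sort."""
--     if n_test_splits <= 0 or n_test_splits >= n_splits:
--         raise ValueError(
--             "n_test_splits must be between 1 and n_splits-1"
--         )
--
--     if n_samples < n_splits:
--         raise ValueError("each fold must contain at least one sample")
--
--     embargo = max(0, embargo)  # a negative embargo purges nothing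
--
--     fold_size = n_samples // n_splits
--     # fold f spans [f*fold_size, ends[f]); the last fold runs to n_samples
--     ends = [(f + 1) * fold_size for f in range(n_splits - 1)] + [n_samples]
--
--     for combo in combinations(range(n_splits), n_test_splits):
--         test_indices = []
--         train_indices = []
--         cursor = 0
--         for f in combo:
--             start = f * fold_size
--             test_indices.extend(range(start, ends[f]))
--             lo = max(0, start - embargo)
--             hi = min(n_samples, ends[f] + embargo)
--             if lo > cursor:
--                 train_indices.extend(range(cursor, lo))
--             if hi > cursor:
--                 cursor = hi
--         train_indices.extend(range(cursor, n_samples))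
--         yield train_indices, test_indices
-- ===== Notes on version B (the rewrite author's own statement) =====
-- stated objective: alternative
-- what changed: B replaces A's materialised folds, per-combo sort, embargo index-set and nested fold-iteration with 'j not in combo' by pure interval arithmetic: each test fold blocks one contiguous interval [max(0,start-embargo), min(n,end+embargo)), and train is emitted as the ascending complement of the union of these intervals by a single cursor sweep over the sorted combo, with no index sets and no per-index membership tests.
import Mathlib
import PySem

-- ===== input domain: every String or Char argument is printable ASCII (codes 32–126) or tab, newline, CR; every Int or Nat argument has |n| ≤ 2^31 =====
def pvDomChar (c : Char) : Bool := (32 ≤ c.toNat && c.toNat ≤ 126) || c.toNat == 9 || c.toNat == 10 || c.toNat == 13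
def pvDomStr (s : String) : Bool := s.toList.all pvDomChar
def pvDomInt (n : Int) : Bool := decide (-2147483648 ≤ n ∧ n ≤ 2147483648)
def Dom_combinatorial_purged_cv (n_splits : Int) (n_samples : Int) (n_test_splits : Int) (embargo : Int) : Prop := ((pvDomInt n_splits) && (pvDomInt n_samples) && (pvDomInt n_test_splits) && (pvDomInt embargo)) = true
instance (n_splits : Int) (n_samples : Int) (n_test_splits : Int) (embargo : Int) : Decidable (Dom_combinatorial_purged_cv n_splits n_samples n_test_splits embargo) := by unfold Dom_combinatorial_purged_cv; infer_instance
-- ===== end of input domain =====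

-- B replaces A's fold lists/sort/embargo set by an interval sweep: each test fold blocks one
-- contiguous interval and train is the ascending complement of their union, built with a cursor;
-- equivalence is about the returned list of pairs (both Pythons are generators, consumed to a list).

-- itertools.combinations(l, k) in itertools' order (shared helper: both Pythons call it)
def pyCombinations {α : Type} : List α → Nat → List (List α)
  | _, 0 => [[]]
  | [], _ + 1 => []
  | x :: xs, k + 1 => (pyCombinations xs k).map (x :: ·) ++ pyCombinations xs (k + 1)

-- ===== PORT A =====
def combinatorial_purged_cv (n_splits : Int) (n_samples : Int) (n_test_splits : Int) (embargo : Int) : List (List Int × List Int) :=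
  if n_test_splits ≤ 0 ∨ n_test_splits ≥ n_splits then [] -- Python: raise ValueError (outside Pre_)
  else
    let fold_size := PySem.Int.floordiv n_samples n_splits
    let indices := PySem.List.pyRange 0 n_samples 1
    let folds0 := (PySem.List.pyRange 0 n_splits 1).map
      (fun i => PySem.List.slice indices (some (i * fold_size)) (some ((i + 1) * fold_size)))
    -- folds[-1].extend(indices[n_splits*fold_size:]) — replace the last fold by its extension
    let folds := if PySem.Int.mod n_samples n_splits ≠ 0 then
        folds0.dropLast ++
          [PySem.List.pyGetD folds0 (-1) [] ++
            PySem.List.slice indices (some (n_splits * fold_size)) none]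
      else folds0
    (pyCombinations (PySem.List.pyRange 0 n_splits 1) n_test_splits.toNat).map (fun combo =>
      let test_indices := PySem.List.sorted
        (combo.flatMap (fun idx => PySem.List.pyGetD folds idx [])) (fun x => x) false
      let emb : PySem.Set Int := combo.foldl (fun s idx =>
        let fold := PySem.List.pyGetD folds idx []
        let start := PySem.List.pyGetD fold 0 0       -- folds[idx][0]  (in range under Pre_)
        let fin := PySem.List.pyGetD fold (-1) 0      -- folds[idx][-1] (in range under Pre_)
        let s := PySem.Set.update s (PySem.List.pyRange (max 0 (start - embargo)) start 1)
        PySem.Set.update s (PySem.List.pyRange (fin + 1) (min n_samples (fin + embargo + 1)) 1))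
        PySem.Set.empty
      let train_indices := (PySem.List.enumerate folds 0).flatMap (fun jf =>
        if jf.1 ∈ combo then []
        else jf.2.filter (fun i => !(PySem.Set.contains emb i)))
      (train_indices, test_indices))

-- ===== PORT B =====
def combinatorial_purged_cv_alt (n_splits : Int) (n_samples : Int) (n_test_splits : Int) (embargo : Int) : List (List Int × List Int) :=
  if n_test_splits ≤ 0 ∨ n_test_splits ≥ n_splits then [] -- Python: raise ValueError (outside Pre_)
  else if n_samples < n_splits then [] -- Python: raise ValueError (outside Pre_)
  else
    let embargo := max 0 embargo  -- a negative embargo purges nothing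
    let fold_size := PySem.Int.floordiv n_samples n_splits
    -- fold f spans [f*fold_size, ends[f]); the last fold runs to n_samples
    let ends := (PySem.List.pyRange 0 (n_splits - 1) 1).map (fun f => (f + 1) * fold_size)
      ++ [n_samples]
    (pyCombinations (PySem.List.pyRange 0 n_splits 1) n_test_splits.toNat).map (fun combo =>
      -- one cursor sweep over the sorted combo: state = (test, train, cursor)
      let st := combo.foldl (fun (acc : List Int × List Int × Int) f =>
        let start := f * fold_size
        let en := PySem.List.pyGetD ends f 0
        let test := acc.1 ++ PySem.List.pyRange start en 1
        let lo := max 0 (start - embargo)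
        let hi := min n_samples (en + embargo)
        let train := if lo > acc.2.2 then acc.2.1 ++ PySem.List.pyRange acc.2.2 lo 1 else acc.2.1
        let cursor := if hi > acc.2.2 then hi else acc.2.2
        (test, train, cursor)) ([], [], 0)
      (st.2.1 ++ PySem.List.pyRange st.2.2 n_samples 1, st.1))

-- ===== PRECONDITION & SPEC =====
-- A raises on every excluded input: ValueError when n_test_splits is not in (0, n_splits),
-- IndexError (folds[idx][0] on an empty fold) when n_samples < n_splits.
def Pre_combinatorial_purged_cv (n_splits : Int) (n_samples : Int) (n_test_splits : Int) (embargo : Int) : Prop :=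
  0 < n_test_splits ∧ n_test_splits < n_splits ∧ n_splits ≤ n_samples
instance (n_splits : Int) (n_samples : Int) (n_test_splits : Int) (embargo : Int) : Decidable (Pre_combinatorial_purged_cv n_splits n_samples n_test_splits embargo) := by unfold Pre_combinatorial_purged_cv; infer_instance
def pvWitness_combinatorial_purged_cv : Int × Int × Int × Int := (3, 7, 1, 1)

def Spec_combinatorial_purged_cv (n_splits : Int) (n_samples : Int) (n_test_splits : Int) (embargo : Int) (out : List (List Int × List Int)) : Prop := out = combinatorial_purged_cv_alt n_splits n_samples n_test_splits embargo
instance (n_splits : Int) (n_samples : Int) (n_test_splits : Int) (embargo : Int) (out : List (List Int × List Int)) : Decidable (Spec_combinatorial_purged_cv n_splits n_samples n_test_splits embargo out) := by unfold Spec_combinatorial_purged_cv; infer_instance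

-- ===== CLAIM (what is proved, stated in full; the proofs are below) =====
def Claim_equal_combinatorial_purged_cv : Prop := ∀ (n_splits : Int) (n_samples : Int) (n_test_splits : Int) (embargo : Int), Dom_combinatorial_purged_cv n_splits n_samples n_test_splits embargo → Pre_combinatorial_purged_cv n_splits n_samples n_test_splits embargo → Spec_combinatorial_purged_cv n_splits n_samples n_test_splits embargo (combinatorial_purged_cv n_splits n_samples n_test_splits embargo)

-- ===== LEMMAS AND PROOFS =====

-- fold-boundary abbreviations (proof-only)
def pvEndp (S F N f : Int) : Int := if f < S - 1 then (f + 1) * F else N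
def pvFoldR (S F N f : Int) : List Int := PySem.List.pyRange (f * F) (pvEndp S F N f) 1
-- the single interval blocked by test fold f in B's sweep
def pvLo (F e f : Int) : Int := max 0 (f * F - e)
def pvHi (S F N e f : Int) : Int := min N (pvEndp S F N f + e)
def pvBlk (S F N e : Int) (combo : List Int) (i : Int) : Bool :=
  combo.any (fun f => decide (pvLo F e f ≤ i ∧ i < pvHi S F N e f))
-- B's cursor sweep, abstracted: returns (emitted train gaps, final cursor)
def pvSweep (S F N e : Int) : Int → List Int → List Int × Int
  | c, [] => ([], c)
  | c, f :: rest =>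
      let r := pvSweep S F N e (if pvHi S F N e f > c then pvHi S F N e f else c) rest
      ((if pvLo F e f > c then PySem.List.pyRange c (pvLo F e f) 1 else []) ++ r.1, r.2)

lemma pv_drop_pyRange (k : Nat) (a b : Int) :
    (PySem.List.pyRange a b 1).drop k = PySem.List.pyRange (a + k) b 1 := by
  induction k generalizing a with
  | zero => simp
  | succ n ih =>
    by_cases h : a < b
    · rw [PySem.List.pyRange_one_cons h]
      simp only [List.drop_succ_cons]
      rw [ih]
      congr 1
      push_cast
      ring
    · rw [PySem.List.pyRange_one_eq_nil (by omega), PySem.List.pyRange_one_eq_nil (by omega)]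
      simp

lemma pv_take_pyRange (k : Nat) (a b : Int) :
    (PySem.List.pyRange a b 1).take k = PySem.List.pyRange a (min (a + k) b) 1 := by
  induction k generalizing a with
  | zero =>
    simp only [List.take_zero]
    rw [PySem.List.pyRange_one_eq_nil (by omega)]
  | succ n ih =>
    by_cases h : a < b
    · rw [PySem.List.pyRange_one_cons h]
      simp only [List.take_succ_cons]
      rw [ih, PySem.List.pyRange_one_cons (show a < min (a + ((n + 1 : Nat) : Int)) b by push_cast; omega)]
      congr 2
      push_cast
      omega
    · rw [PySem.List.pyRange_one_eq_nil (by omega), PySem.List.pyRange_one_eq_nil (by omega)]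
      simp

lemma pv_slice_pyRange (N a b : Int) (ha : 0 ≤ a) (hab : a ≤ b) :
    PySem.List.slice (PySem.List.pyRange 0 N 1) (some a) (some b)
      = PySem.List.pyRange a (min b N) 1 := by
  rw [PySem.List.slice_toNat _ ha (by omega), pv_drop_pyRange, pv_take_pyRange]
  have e1 : (0 : Int) + (a.toNat : Int) = a := by omega
  rw [e1]
  have e2 : a + ((b.toNat - a.toNat : Nat) : Int) = b := by omega
  rw [e2]

lemma pv_sliceFrom_pyRange (N a : Int) (ha : 0 ≤ a) :
    PySem.List.slice (PySem.List.pyRange 0 N 1) (some a) none = PySem.List.pyRange a N 1 := by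
  rw [PySem.List.slice_from _ ha, pv_drop_pyRange]
  congr 1
  omega

lemma pvCombinations_sublist {α : Type} :
    ∀ (l : List α) (k : Nat) (c : List α), c ∈ pyCombinations l k → c.Sublist l := by
  intro l
  induction l with
  | nil =>
    intro k c h
    cases k with
    | zero => simp only [pyCombinations, List.mem_singleton] at h; simp [h]
    | succ n => simp [pyCombinations] at h
  | cons x xs ih =>
    intro k c h
    cases k with
    | zero => simp only [pyCombinations, List.mem_singleton] at h; simp [h]
    | succ n =>
      simp only [pyCombinations, List.mem_append, List.mem_map] at h
      rcases h with ⟨c', hc', rfl⟩ | h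
      · exact (ih n c' hc').cons₂ x
      · exact (ih (n + 1) c h).cons x

lemma pv_head_pyRange (a b : Int) (h : a < b) :
    PySem.List.pyGetD (PySem.List.pyRange a b 1) 0 (0 : Int) = a := by
  rw [PySem.List.pyRange_one_cons h, PySem.List.pyGetD_zero_cons]

lemma pv_last_pyRange (a b : Int) (h : a < b) :
    PySem.List.pyGetD (PySem.List.pyRange a b 1) (-1) (0 : Int) = b - 1 := by
  have e : PySem.List.pyRange a b 1 = PySem.List.pyRange a (b - 1) 1 ++ [b - 1] := by
    have h2 : a ≤ b - 1 := by omega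
    have := PySem.List.pyRange_one_succ_right (a := a) (b := b - 1) h2
    rw [show b - 1 + 1 = b by omega] at this
    exact this
  rw [e, PySem.List.pyGetD_neg_one_append_singleton]

lemma pv_lt_endp (S F N f : Int) (hF : 1 ≤ F) (hSFN : S * F ≤ N) (hfS : f < S) :
    f * F < pvEndp S F N f := by
  unfold pvEndp
  split_ifs with h
  · have e : (f + 1) * F = f * F + F := by ring
    linarith
  · have hf : f = S - 1 := by omega
    subst hf
    have e : (S - 1) * F = S * F - F := by ring
    linarith

lemma pv_endp_le (S F N f : Int) (hF : 0 ≤ F) (hSFN : S * F ≤ N) (hfS : f < S) :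
    pvEndp S F N f ≤ N := by
  unfold pvEndp
  split_ifs with h
  · have : (f + 1) * F ≤ S * F := mul_le_mul_of_nonneg_right (by omega) hF
    omega
  · omega

lemma pv_endp_mono (S F N f g : Int) (hF : 0 ≤ F) (hfg : f < g) (hgS : g < S) :
    pvEndp S F N f ≤ g * F := by
  unfold pvEndp
  rw [if_pos (by omega)]
  apply mul_le_mul_of_nonneg_right (by omega) hF

lemma pv_pairwise_flat (S F N : Int) (combo : List Int) (hF : 1 ≤ F) (hSFN : S * F ≤ N)
    (hsub : combo.Sublist (PySem.List.pyRange 0 S 1)) :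
    (combo.flatMap (pvFoldR S F N)).Pairwise (· < ·) := by
  rw [List.pairwise_flatMap]
  have hmem : ∀ x ∈ combo, 0 ≤ x ∧ x < S := by
    intro x hx
    have := hsub.subset hx
    rw [PySem.List.mem_pyRange_one] at this
    exact this
  constructor
  · intro a _
    exact PySem.List.pairwise_lt_pyRange_one _ _
  · have hc : combo.Pairwise (· < ·) :=
      (PySem.List.pairwise_lt_pyRange_one 0 S).sublist hsub
    refine List.Pairwise.imp_of_mem ?_ hc
    intro f g hf hg hfg x hx y hy
    obtain ⟨hf0, hfS⟩ := hmem f hf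
    obtain ⟨hg0, hgS⟩ := hmem g hg
    unfold pvFoldR at hx hy
    rw [PySem.List.mem_pyRange_one] at hx hy
    have h1 : pvEndp S F N f ≤ g * F := pv_endp_mono S F N f g (by omega) hfg hgS
    omega

lemma pv_tile (S F N : Int) (hF : 1 ≤ F) (hSFN : S * F ≤ N) :
    ∀ (n : Nat) (j : Int), 0 ≤ j → j = S - 1 - n →
      PySem.List.pyRange (j * F) N 1 = (PySem.List.pyRange j S 1).flatMap (pvFoldR S F N) := by
  intro n
  induction n with
  | zero =>
    intro j hj0 hj
    have hj' : j = S - 1 := by omega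
    have hsing : PySem.List.pyRange j S 1 = [j] := by
      rw [show S = j + 1 by omega]
      exact PySem.List.pyRange_one_singleton j
    rw [hsing]
    simp only [List.flatMap_cons, List.flatMap_nil, List.append_nil]
    unfold pvFoldR pvEndp
    rw [if_neg (by omega)]
  | succ n ih =>
    intro j hj0 hj
    have hjS : j < S - 1 := by omega
    rw [PySem.List.pyRange_one_cons (show j < S by omega)]
    simp only [List.flatMap_cons]
    rw [← ih (j + 1) (by omega) (by omega)]
    have h1 : (j + 1) * F ≤ N := by
      have : (j + 1) * F ≤ S * F := mul_le_mul_of_nonneg_right (by omega) (by omega)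
      linarith
    have h2 : j * F ≤ (j + 1) * F := by nlinarith
    unfold pvFoldR pvEndp
    rw [if_pos hjS]
    exact PySem.List.pyRange_one_append (j * F) ((j + 1) * F) N h2 h1

lemma pv_foldsA (S N : Int) (hS : 2 ≤ S) (hSN : S ≤ N) :
    (if PySem.Int.mod N S ≠ 0 then
       (List.map (fun i => PySem.List.slice (PySem.List.pyRange 0 N 1)
           (some (i * PySem.Int.floordiv N S)) (some ((i + 1) * PySem.Int.floordiv N S)))
           (PySem.List.pyRange 0 S 1)).dropLast ++
         [PySem.List.pyGetD (List.map (fun i => PySem.List.slice (PySem.List.pyRange 0 N 1)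
             (some (i * PySem.Int.floordiv N S)) (some ((i + 1) * PySem.Int.floordiv N S)))
             (PySem.List.pyRange 0 S 1)) (-1) [] ++
           PySem.List.slice (PySem.List.pyRange 0 N 1) (some (S * PySem.Int.floordiv N S)) none]
     else
       List.map (fun i => PySem.List.slice (PySem.List.pyRange 0 N 1)
           (some (i * PySem.Int.floordiv N S)) (some ((i + 1) * PySem.Int.floordiv N S)))
           (PySem.List.pyRange 0 S 1))
    = (PySem.List.pyRange 0 S 1).map (pvFoldR S (PySem.Int.floordiv N S) N) := by
  have hS0 : (0 : Int) < S := by omega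
  set F := PySem.Int.floordiv N S with hFdef
  have hF : 1 ≤ F := (PySem.Int.le_floordiv_iff_mul_le hS0).mpr (by omega)
  have hdm := PySem.Int.floordiv_mul_add_mod N S
  have hm0 := PySem.Int.mod_nonneg N hS0
  have hSFN : S * F ≤ N := by rw [← hFdef] at hdm; nlinarith [mul_comm S F]
  have hslice : ∀ i : Int, 0 ≤ i → i < S →
      PySem.List.slice (PySem.List.pyRange 0 N 1) (some (i * F)) (some ((i + 1) * F))
        = PySem.List.pyRange (i * F) (min ((i + 1) * F) N) 1 := by
    intro i hi0 hiS
    exact pv_slice_pyRange N (i * F) ((i + 1) * F) (mul_nonneg hi0 (by omega))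
      (by nlinarith)
  have hmin : ∀ i : Int, 0 ≤ i → i < S - 1 → min ((i + 1) * F) N = (i + 1) * F := by
    intro i hi0 hiS
    have : (i + 1) * F ≤ S * F := mul_le_mul_of_nonneg_right (by omega) (by omega)
    exact min_eq_left (by omega)
  by_cases hmod : PySem.Int.mod N S = 0
  · rw [if_neg (by simpa using hmod)]
    apply List.map_congr_left
    intro i hi
    rw [PySem.List.mem_pyRange_one] at hi
    rw [hslice i hi.1 hi.2]
    unfold pvFoldR pvEndp
    by_cases h : i < S - 1
    · rw [if_pos h, hmin i hi.1 h]
    · have hi' : i = S - 1 := by omega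
      subst hi'
      rw [if_neg h]
      congr 1
      have hdm' := hdm
      rw [← hFdef] at hdm'
      have hNSF : N = S * F := by linarith [hdm', hmod, mul_comm F S]
      rw [show S - 1 + 1 = S by ring, ← hNSF]
      exact min_self N
  · rw [if_pos hmod]
    have hlt : S * F < N := by
      rcases lt_or_eq_of_le hSFN with h | h
      · exact h
      · exfalso; apply hmod; nlinarith [mul_comm S F]
    have hsplit : PySem.List.pyRange 0 S 1 = PySem.List.pyRange 0 (S - 1) 1 ++ [S - 1] := by
      have := PySem.List.pyRange_one_succ_right (a := 0) (b := S - 1) (by omega)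
      rw [show S - 1 + 1 = S by ring] at this
      exact this
    rw [hsplit]
    simp only [List.map_append, List.map_cons, List.map_nil]
    rw [List.dropLast_concat, PySem.List.pyGetD_neg_one_append_singleton]
    congr 1
    · apply List.map_congr_left
      intro i hi
      rw [PySem.List.mem_pyRange_one] at hi
      rw [hslice i hi.1 (by omega)]
      unfold pvFoldR pvEndp
      rw [if_pos (by omega), hmin i hi.1 (by omega)]
    · congr 1
      rw [hslice (S - 1) (by omega) (by omega)]
      rw [pv_sliceFrom_pyRange N (S * F) (by positivity)]
      unfold pvFoldR pvEndp
      rw [if_neg (by omega)]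
      rw [show min ((S - 1 + 1) * F) N = S * F from by rw [show S - 1 + 1 = S by ring]; exact min_eq_left (by omega)]
      exact (PySem.List.pyRange_one_append ((S - 1) * F) (S * F) N (by nlinarith) (by omega)).symm

def pvEmb (N e F S : Int) (combo : List Int) : PySem.Set Int :=
  combo.foldl (fun s f =>
    PySem.Set.update
      (PySem.Set.update s (PySem.List.pyRange (max 0 (f * F - e)) (f * F) 1))
      (PySem.List.pyRange (pvEndp S F N f) (min N (pvEndp S F N f + e)) 1))
    PySem.Set.empty

lemma pv_trainA (S F N : Int) (combo : List Int) (q : Int → Bool) (hS : 0 ≤ S) :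
    List.flatMap (fun jf => if jf.1 ∈ combo then [] else List.filter q jf.2)
        (PySem.List.enumerate (List.map (pvFoldR S F N) (PySem.List.pyRange 0 S 1)))
      = List.flatMap (fun j => if j ∈ combo then [] else List.filter q (pvFoldR S F N j))
          (PySem.List.pyRange 0 S 1) := by
  rw [PySem.List.enumerate_eq_map_pyRange _ ([] : List Int)]
  have hlen : PySem.List.len (List.map (pvFoldR S F N) (PySem.List.pyRange 0 S 1)) = S := by
    simp [pysem]
    omega
  rw [hlen, List.flatMap_map]
  apply List.flatMap_congr
  intro j hj
  rw [PySem.List.mem_pyRange_one] at hj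
  simp only
  rw [PySem.List.pyGetD_map_pyRange_of_nonneg _ S j [] hj.1 hj.2]

-- a negative embargo blocks nothing: both of A's embargo ranges are empty, as with embargo 0
lemma pv_emb_clamp (S F N e : Int) (combo : List Int) (hF : 1 ≤ F) (hSFN : S * F ≤ N)
    (hmem : ∀ f ∈ combo, 0 ≤ f ∧ f < S) :
    pvEmb N e F S combo = pvEmb N (max 0 e) F S combo := by
  unfold pvEmb
  apply PySem.List.foldl_congr_mem
  intro acc f hf
  obtain ⟨hf0, hfS⟩ := hmem f hf
  have hfF0 : 0 ≤ f * F := mul_nonneg hf0 (by omega)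
  have hendN : pvEndp S F N f ≤ N := pv_endp_le S F N f (by omega) hSFN hfS
  by_cases he : 0 ≤ e
  · rw [max_eq_right he]
  · congr 1
    · congr 1
      rw [PySem.List.pyRange_one_eq_nil (by omega), PySem.List.pyRange_one_eq_nil (by omega)]
    · rw [PySem.List.pyRange_one_eq_nil (by omega), PySem.List.pyRange_one_eq_nil (by omega)]

-- membership in the embargo set, as an `any` over the combo
lemma pv_mem_emb_aux (N e F S : Int) (i : Int) :
    ∀ (combo : List Int) (s : PySem.Set Int),
      i ∈ (combo.foldl (fun s f =>
        PySem.Set.update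
          (PySem.Set.update s (PySem.List.pyRange (max 0 (f * F - e)) (f * F) 1))
          (PySem.List.pyRange (pvEndp S F N f) (min N (pvEndp S F N f + e)) 1)) s)
      ↔ i ∈ s ∨ ∃ f ∈ combo,
          (max 0 (f * F - e) ≤ i ∧ i < f * F) ∨
          (pvEndp S F N f ≤ i ∧ i < min N (pvEndp S F N f + e)) := by
  intro combo
  induction combo with
  | nil => intro s; simp
  | cons f rest ih =>
    intro s
    simp only [List.foldl_cons]
    rw [ih]
    simp only [PySem.Set.mem_update, PySem.List.mem_pyRange_one, List.mem_cons]
    constructor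
    · rintro (((h | h) | h) | ⟨g, hg, h⟩)
      · exact Or.inl h
      · exact Or.inr ⟨f, Or.inl rfl, Or.inl h⟩
      · exact Or.inr ⟨f, Or.inl rfl, Or.inr h⟩
      · exact Or.inr ⟨g, Or.inr hg, h⟩
    · rintro (h | ⟨g, (rfl | hg), h⟩)
      · exact Or.inl (Or.inl (Or.inl h))
      · rcases h with h | h
        · exact Or.inl (Or.inl (Or.inr h))
        · exact Or.inl (Or.inr h)
      · exact Or.inr ⟨g, hg, h⟩

-- A's train list, as one filter of range(n_samples) by B's blocked predicate
lemma pv_trainA_filter (S F N e : Int) (combo : List Int)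
    (hF : 1 ≤ F) (hSFN : S * F ≤ N) (he : 0 ≤ e) (hS : 2 ≤ S)
    (hmem : ∀ f ∈ combo, 0 ≤ f ∧ f < S) :
    (PySem.List.pyRange 0 N 1).filter (fun i => !pvBlk S F N e combo i)
      = List.flatMap (fun j => if j ∈ combo then []
          else List.filter (fun i => !(PySem.Set.contains (pvEmb N e F S combo) i)) (pvFoldR S F N j))
          (PySem.List.pyRange 0 S 1) := by
  have htile : PySem.List.pyRange 0 N 1 = (PySem.List.pyRange 0 S 1).flatMap (pvFoldR S F N) := by
    have h := pv_tile S F N hF hSFN (S - 1).toNat 0 le_rfl (by omega)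
    rw [zero_mul] at h
    exact h
  rw [htile, List.filter_flatMap]
  apply List.flatMap_congr
  intro j hj
  rw [PySem.List.mem_pyRange_one] at hj
  have hdisj : ∀ f i, f ∈ combo → f ≠ j → j * F ≤ i → i < pvEndp S F N j →
      ¬ (f * F ≤ i ∧ i < pvEndp S F N f) := by
    intro f i hf hfj hi1 hi2 ⟨h1, h2⟩
    obtain ⟨hf0, hfS⟩ := hmem f hf
    rcases lt_or_gt_of_ne hfj with h | h
    · have := pv_endp_mono S F N f j (by omega) h hj.2
      omega
    · have := pv_endp_mono S F N j f (by omega) h hfS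
      omega
  by_cases hjc : j ∈ combo
  · rw [if_pos hjc]
    apply List.filter_eq_nil_iff.mpr
    intro i hi
    unfold pvFoldR at hi
    rw [PySem.List.mem_pyRange_one] at hi
    have hend := pv_endp_le S F N j (by omega) hSFN hj.2
    have hjF0 : 0 ≤ j * F := mul_nonneg hj.1 (by omega)
    have hblk : pvBlk S F N e combo i = true := by
      simp only [pvBlk, List.any_eq_true, decide_eq_true_eq]
      exact ⟨j, hjc, by unfold pvLo pvHi; omega⟩
    simp [hblk]
  · rw [if_neg hjc]
    apply List.filter_congr
    intro i hi
    unfold pvFoldR at hi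
    rw [PySem.List.mem_pyRange_one] at hi
    congr 1
    rw [Bool.eq_iff_iff]
    have hemb : PySem.Set.contains (pvEmb N e F S combo) i = true ↔
        ∃ f ∈ combo, (max 0 (f * F - e) ≤ i ∧ i < f * F) ∨
          (pvEndp S F N f ≤ i ∧ i < min N (pvEndp S F N f + e)) := by
      rw [PySem.Set.contains_iff]
      unfold pvEmb
      rw [pv_mem_emb_aux]
      simp [PySem.Set.empty]
    rw [hemb]
    simp only [pvBlk, List.any_eq_true, decide_eq_true_eq, pvLo, pvHi]
    constructor
    · rintro ⟨f, hf, h1, h2⟩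
      obtain ⟨hf0, hfS⟩ := hmem f hf
      have hfj : f ≠ j := fun h => hjc (h ▸ hf)
      have hnd := hdisj f i hf hfj hi.1 hi.2
      have hend := pv_endp_le S F N f (by omega) hSFN hfS
      refine ⟨f, hf, ?_⟩
      by_cases hcase : i < f * F
      · exact Or.inl ⟨h1, hcase⟩
      · exact Or.inr ⟨by omega, h2⟩
    · rintro ⟨f, hf, h⟩
      obtain ⟨hf0, hfS⟩ := hmem f hf
      have h1 : f * F < pvEndp S F N f := pv_lt_endp S F N f hF hSFN hfS
      have hend := pv_endp_le S F N f (by omega) hSFN hfS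
      have hfF0 : 0 ≤ f * F := mul_nonneg hf0 (by omega)
      refine ⟨f, hf, ?_⟩
      rcases h with ⟨ha, hb⟩ | ⟨ha, hb⟩ <;> constructor <;> omega

-- B's ends list equals the fold endpoints
lemma pv_ends_eq (S F N : Int) (hS : 2 ≤ S) :
    (PySem.List.pyRange 0 (S - 1) 1).map (fun f => (f + 1) * F) ++ [N]
      = (PySem.List.pyRange 0 S 1).map (pvEndp S F N) := by
  have hsplit : PySem.List.pyRange 0 S 1 = PySem.List.pyRange 0 (S - 1) 1 ++ [S - 1] := by
    have := PySem.List.pyRange_one_succ_right (a := 0) (b := S - 1) (by omega)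
    rw [show S - 1 + 1 = S by ring] at this
    exact this
  rw [hsplit, List.map_append]
  congr 1
  · apply List.map_congr_left
    intro f hf
    rw [PySem.List.mem_pyRange_one] at hf
    unfold pvEndp
    rw [if_pos (by omega)]
  · simp only [List.map_cons, List.map_nil]
    unfold pvEndp
    rw [if_neg (by omega)]

lemma pv_lo_mono (F e f g : Int) (hF : 0 ≤ F) (hfg : f ≤ g) : pvLo F e f ≤ pvLo F e g := by
  unfold pvLo
  have : f * F ≤ g * F := mul_le_mul_of_nonneg_right hfg hF
  omega

-- B's foldl over a combo, split into its three components
lemma pv_foldl_B (S F N e : Int) (ends : List Int) (combo : List Int) :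
    ∀ (t tr : List Int) (c : Int),
      (∀ f ∈ combo, PySem.List.pyGetD ends f 0 = pvEndp S F N f) →
      combo.foldl (fun (acc : List Int × List Int × Int) f =>
        let start := f * F
        let en := PySem.List.pyGetD ends f 0
        let test := acc.1 ++ PySem.List.pyRange start en 1
        let lo := max 0 (start - e)
        let hi := min N (en + e)
        let train := if lo > acc.2.2 then acc.2.1 ++ PySem.List.pyRange acc.2.2 lo 1 else acc.2.1
        let cursor := if hi > acc.2.2 then hi else acc.2.2
        (test, train, cursor)) (t, tr, c)
      = (t ++ combo.flatMap (pvFoldR S F N), tr ++ (pvSweep S F N e c combo).1,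
          (pvSweep S F N e c combo).2) := by
  induction combo with
  | nil => intro t tr c _; simp [pvSweep]
  | cons f rest ih =>
    intro t tr c hget
    simp only [List.foldl_cons]
    rw [hget f List.mem_cons_self]
    rw [ih _ _ _ (fun g hg => hget g (List.mem_cons_of_mem f hg))]
    simp only [pvSweep, pvFoldR, pvLo, pvHi, List.flatMap_cons, Prod.mk.injEq]
    refine ⟨by simp, ?_, by simp⟩
    split_ifs <;> simp

-- the cursor sweep emits exactly the unblocked indices of range(cursor, n_samples)
lemma pv_sweep_filter (S F N e : Int) (hF : 1 ≤ F) (hSFN : S * F ≤ N) (he : 0 ≤ e) :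
    ∀ (combo : List Int) (c : Int), 0 ≤ c → c ≤ N →
      combo.Pairwise (· < ·) → (∀ f ∈ combo, 0 ≤ f ∧ f < S) →
      (pvSweep S F N e c combo).1 ++ PySem.List.pyRange (pvSweep S F N e c combo).2 N 1
        = (PySem.List.pyRange c N 1).filter (fun i => !pvBlk S F N e combo i) := by
  intro combo
  induction combo with
  | nil =>
    intro c _ _ _ _
    simp [pvSweep, pvBlk]
  | cons f rest ih =>
    intro c hc0 hcN hpw hmem
    obtain ⟨hf0, hfS⟩ := hmem f List.mem_cons_self
    have hfF0 : 0 ≤ f * F := mul_nonneg hf0 (by omega)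
    have hlos : pvLo F e f ≤ f * F := by unfold pvLo; omega
    have hlo0 : 0 ≤ pvLo F e f := le_max_left _ _
    have hse : f * F < pvEndp S F N f := pv_lt_endp S F N f hF hSFN hfS
    have hendN : pvEndp S F N f ≤ N := pv_endp_le S F N f (by omega) hSFN hfS
    have hehi : pvEndp S F N f ≤ pvHi S F N e f := by unfold pvHi; omega
    have hlohi : pvLo F e f < pvHi S F N e f := by omega
    have hhiN : pvHi S F N e f ≤ N := min_le_left _ _
    have hrestpw : rest.Pairwise (· < ·) := hpw.of_cons
    have hrestmem : ∀ g ∈ rest, 0 ≤ g ∧ g < S := fun g hg => hmem g (List.mem_cons_of_mem f hg)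
    have hflt : ∀ g ∈ rest, f < g := fun g hg => (List.pairwise_cons.mp hpw).1 g hg
    have hcursor : (if pvHi S F N e f > c then pvHi S F N e f else c) = max c (pvHi S F N e f) := by
      split_ifs with h <;> omega
    have hsplit : PySem.List.pyRange c N 1
        = PySem.List.pyRange c (max c (pvLo F e f)) 1 ++
            (PySem.List.pyRange (max c (pvLo F e f)) (max c (pvHi S F N e f)) 1 ++
              PySem.List.pyRange (max c (pvHi S F N e f)) N 1) := by
      rw [← PySem.List.pyRange_one_append (max c (pvLo F e f)) (max c (pvHi S F N e f)) N
        (by omega) (by omega)]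
      exact PySem.List.pyRange_one_append c (max c (pvLo F e f)) N (by omega) (by omega)
    rw [hsplit, List.filter_append, List.filter_append]
    -- part 1: below the first interval nothing is blocked
    have hpart1 : (PySem.List.pyRange c (max c (pvLo F e f)) 1).filter
          (fun i => !pvBlk S F N e (f :: rest) i)
        = if pvLo F e f > c then PySem.List.pyRange c (pvLo F e f) 1 else [] := by
      by_cases hcase : pvLo F e f > c
      · rw [if_pos hcase, show max c (pvLo F e f) = pvLo F e f by omega]
        apply List.filter_eq_self.mpr
        intro i hi'
        rw [PySem.List.mem_pyRange_one] at hi'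
        have hblk : pvBlk S F N e (f :: rest) i = false := by
          simp only [pvBlk, List.any_eq_false]
          intro g hg
          have hlog : pvLo F e f ≤ pvLo F e g := by
            rcases List.mem_cons.mp hg with rfl | hg'
            · exact le_refl _
            · exact pv_lo_mono F e f g (by omega) (le_of_lt (hflt g hg'))
          simp only [decide_eq_true_eq, not_and, not_lt]
          intro hgi
          omega
        simp [hblk]
      · rw [if_neg hcase, show max c (pvLo F e f) = c by omega,
          PySem.List.pyRange_one_eq_nil (le_refl c)]
        rfl
    -- part 2: the blocked interval is filtered out entirely
    have hpart2 : (PySem.List.pyRange (max c (pvLo F e f)) (max c (pvHi S F N e f)) 1).filter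
          (fun i => !pvBlk S F N e (f :: rest) i) = [] := by
      apply List.filter_eq_nil_iff.mpr
      intro i hi'
      rw [PySem.List.mem_pyRange_one] at hi'
      have hblk : pvBlk S F N e (f :: rest) i = true := by
        simp only [pvBlk, List.any_eq_true, decide_eq_true_eq]
        exact ⟨f, List.mem_cons_self, by omega, by omega⟩
      simp [hblk]
    -- part 3: above the first interval only the rest blocks
    have hpart3 : (PySem.List.pyRange (max c (pvHi S F N e f)) N 1).filter
          (fun i => !pvBlk S F N e (f :: rest) i)
        = (PySem.List.pyRange (max c (pvHi S F N e f)) N 1).filter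
            (fun i => !pvBlk S F N e rest i) := by
      apply List.filter_congr
      intro i hi'
      rw [PySem.List.mem_pyRange_one] at hi'
      have hnof : decide (pvLo F e f ≤ i ∧ i < pvHi S F N e f) = false := by
        simp only [decide_eq_false_iff_not]
        omega
      simp only [pvBlk, List.any_cons, hnof, Bool.false_or]
    rw [hpart1, hpart2, hpart3]
    have hih := ih (max c (pvHi S F N e f)) (by omega) (by omega) hrestpw hrestmem
    simp only [pvSweep, hcursor]
    rw [List.append_assoc, hih]
    simp

-- ===== VERDICT (by name: the statement is the Claim_ definition above) =====
theorem combinatorial_purged_cv_spec : Claim_equal_combinatorial_purged_cv := by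
  intro S N k e _ hpre
  obtain ⟨hk0, hkS, hSN⟩ := hpre
  unfold Spec_combinatorial_purged_cv combinatorial_purged_cv combinatorial_purged_cv_alt
  rw [if_neg (by omega), if_neg (by omega), if_neg (by omega)]
  dsimp only
  rw [pv_foldsA S N (by omega) hSN, pv_ends_eq S (PySem.Int.floordiv N S) N (by omega)]
  set F := PySem.Int.floordiv N S with hFdef
  have hS0 : (0 : Int) < S := by omega
  have hF : 1 ≤ F := (PySem.Int.le_floordiv_iff_mul_le hS0).mpr (by omega)
  have hSFN : S * F ≤ N := by
    have hdm := PySem.Int.floordiv_mul_add_mod N S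
    have hm0 := PySem.Int.mod_nonneg N hS0
    rw [← hFdef] at hdm
    nlinarith [mul_comm S F]
  apply List.map_congr_left
  intro combo hcombo
  have hsub := pvCombinations_sublist _ _ _ hcombo
  have hmemS : ∀ x ∈ combo, 0 ≤ x ∧ x < S := by
    intro x hx
    have := hsub.subset hx
    rwa [PySem.List.mem_pyRange_one] at this
  have hpw : combo.Pairwise (· < ·) :=
    (PySem.List.pairwise_lt_pyRange_one 0 S).sublist hsub
  have hgA : ∀ idx ∈ combo,
      PySem.List.pyGetD (List.map (pvFoldR S F N) (PySem.List.pyRange 0 S 1)) idx [] = pvFoldR S F N idx := by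
    intro idx h
    exact PySem.List.pyGetD_map_pyRange_of_nonneg _ S idx [] (hmemS idx h).1 (hmemS idx h).2
  have hget : ∀ f ∈ combo,
      PySem.List.pyGetD (List.map (pvEndp S F N) (PySem.List.pyRange 0 S 1)) f 0 = pvEndp S F N f := by
    intro f h
    exact PySem.List.pyGetD_map_pyRange_of_nonneg _ S f 0 (hmemS f h).1 (hmemS f h).2
  -- B side: expose the sweep
  rw [pv_foldl_B S F N (max 0 e) _ combo [] [] 0 hget]
  simp only [List.nil_append]
  -- A side: test indices
  have htest : PySem.List.sorted
      (List.flatMap (fun idx => PySem.List.pyGetD (List.map (pvFoldR S F N) (PySem.List.pyRange 0 S 1)) idx []) combo)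
      (fun x => x) false = combo.flatMap (pvFoldR S F N) := by
    rw [List.flatMap_congr hgA]
    exact PySem.List.sorted_eq_of_perm_of_pairwise_lt _ _ _ (List.Perm.refl _)
      (pv_pairwise_flat S F N combo hF hSFN hsub)
  -- A side: embargo set
  have hembA : List.foldl (fun s idx =>
      PySem.Set.update
        (PySem.Set.update s (PySem.List.pyRange
          (max 0 (PySem.List.pyGetD (PySem.List.pyGetD (List.map (pvFoldR S F N) (PySem.List.pyRange 0 S 1)) idx []) 0 0 - e))
          (PySem.List.pyGetD (PySem.List.pyGetD (List.map (pvFoldR S F N) (PySem.List.pyRange 0 S 1)) idx []) 0 0) 1))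
        (PySem.List.pyRange
          (PySem.List.pyGetD (PySem.List.pyGetD (List.map (pvFoldR S F N) (PySem.List.pyRange 0 S 1)) idx []) (-1) 0 + 1)
          (min N (PySem.List.pyGetD (PySem.List.pyGetD (List.map (pvFoldR S F N) (PySem.List.pyRange 0 S 1)) idx []) (-1) 0 + e + 1)) 1))
      PySem.Set.empty combo = pvEmb N e F S combo := by
    unfold pvEmb
    apply PySem.List.foldl_congr_mem
    intro acc x hx
    obtain ⟨hx0, hxS⟩ := hmemS x hx
    have hlt := pv_lt_endp S F N x hF hSFN hxS
    rw [hgA x hx]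
    unfold pvFoldR
    rw [pv_head_pyRange _ _ hlt, pv_last_pyRange _ _ hlt,
      show pvEndp S F N x - 1 + 1 = pvEndp S F N x by ring,
      show pvEndp S F N x - 1 + e + 1 = pvEndp S F N x + e by ring]
  rw [htest, hembA, pv_emb_clamp S F N e combo hF hSFN hmemS]
  -- A side: train indices
  rw [pv_trainA S F N combo _ (by omega)]
  rw [← pv_trainA_filter S F N (max 0 e) combo hF hSFN (le_max_left 0 e) (by omega) hmemS]
  exact congrArg₂ Prod.mk
    (pv_sweep_filter S F N (max 0 e) hF hSFN (le_max_left 0 e) combo 0 le_rfl (by omega) hpw hmemS).symm rfl
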